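-- pv_equiv track=rewrite | github.com/nockchun/danbi | danbi/database/IDB.py | _pyformat2psql
-- ===== SOURCE A (Python) =====
-- import collections
-- import itertools
-- from typing import Any, Dict, Tuple, List, Union
--
-- def _pyformat2psql(query: str, named_args: Dict[str, Any]) -> Tuple[str, List[Any]]:
--     positional_generator = itertools.count(1)
--     positional_map = collections.defaultdict(lambda: '${}'.format(next(positional_generator)))
--     formatted_query = query % positional_map
--     positional_items = sorted(
--         positional_map.items(),
--         key=lambda item: int(item[1].replace('$', '')),
--     )
--     positional_args = [named_args[named_arg] for named_arg, _ in positional_items]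
--     return formatted_query, positional_args
-- ===== SOURCE B (Python) =====
-- def _tokenize(query):
--     tokens = []
--     i, n = 0, len(query)
--     while i < n:
--         if query[i] != '%':
--             tokens.append(('lit', query[i]))
--             i += 1
--         elif query.startswith('%%', i):
--             tokens.append(('lit', '%'))
--             i += 2
--         elif query.startswith('%(', i):
--             j = query.find(')', i + 2)
--             if j == -1 or not query.startswith(')s', j):
--                 raise ValueError('unsupported format specifier in query')
--             tokens.append(('name', query[i + 2:j]))
--             i = j + 2
--         else:
--             raise ValueError('unsupported format specifier in query')
--     return tokens
--
--
-- def _pyformat2psql(query, named_args):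
--     tokens = _tokenize(query)
--     order = list(dict.fromkeys(name for kind, name in tokens if kind == 'name'))
--     index = {name: k + 1 for k, name in enumerate(order)}
--     psql = ''.join(text if kind == 'lit' else '$' + str(index[text])
--                    for kind, text in tokens)
--     return psql, [named_args[name] for name in order]
-- ===== Notes on version B (the rewrite author's own statement) =====
-- stated objective: idiomatic
-- what changed: Replaces the defaultdict-with-counter fed to the '%' operator plus a post-hoc sort of the dict items with staged passes: tokenize the query into literal/placeholder tokens, dedup the placeholder names in first-occurrence order (dict.fromkeys), build a name-to-position index, then render the string and the args list from those tables; no mutable dict-with-side-effecting-default and no sort remain.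
-- outside the precondition, e.g. on _pyformat2psql('%(a)5s', {'a': 'x'}): A returns ('   $1', ['x']), B raises ValueError; on _pyformat2psql('%(a)r', {'a': 'x'}): A returns ("'$1'", ['x']), B raises ValueError; on _pyformat2psql('%((a))s', {'(a)': 'x'}): A returns ('$1', ['x']), B raises ValueError
import Mathlib
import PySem

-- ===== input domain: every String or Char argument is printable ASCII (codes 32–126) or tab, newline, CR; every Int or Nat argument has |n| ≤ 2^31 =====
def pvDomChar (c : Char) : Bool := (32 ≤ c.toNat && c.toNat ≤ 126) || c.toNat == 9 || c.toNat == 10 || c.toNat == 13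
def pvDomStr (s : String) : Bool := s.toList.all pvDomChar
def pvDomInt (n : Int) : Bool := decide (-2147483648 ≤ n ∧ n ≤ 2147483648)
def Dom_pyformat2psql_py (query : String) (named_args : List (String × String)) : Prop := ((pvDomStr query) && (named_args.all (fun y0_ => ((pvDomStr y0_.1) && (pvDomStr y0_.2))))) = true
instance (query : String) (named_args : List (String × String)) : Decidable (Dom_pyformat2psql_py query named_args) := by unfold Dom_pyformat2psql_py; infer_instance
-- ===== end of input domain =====

-- B replaces A's defaultdict+counter fed to Python's '%' operator (plus a post-hoc sort of the
-- map's items) by staged passes: tokenize, dedup the names in first-occurrence order, build a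
-- name→position index, then render the string and the args list from those tables.

-- ===== PORT A =====
-- hand port of int(s) for the values reaching A's sort key: the '$'-stripped '$n' strings,
-- i.e. pure decimal-digit strings, on which this fold is exactly Python's int()
def decDigitsVal (cs : List Char) : Int := cs.foldl (fun a c => a * 10 + ((c.toNat : Int) - 48)) 0

-- A's sort key: int(item[1].replace('$', ''))
def keyA (v : String) : Int := decDigitsVal (PySem.Str.replace v "$" "").toList

-- hand port of CPython's `query % mapping` scan (str.__mod__ is not a PySem primitive), restricted
-- to the '%%' and '%(name)s' forms admitted by Pre_ (exact there; on any other '%' spec CPython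
-- raises or applies padding/repr — outside Pre_, where this port just stops).
-- The defaultdict is the Dict; a miss stores '$'+str(counter) and bumps the counter, like A's lambda.
def fmtA : List Char → PySem.Dict String String → Int → (List Char × PySem.Dict String String × Int)
  | [], d, cnt => ([], d, cnt)
  | ch :: t, d, cnt =>
    if ch = '%' then
      match t with
      | [] => ([], d, cnt)          -- CPython: ValueError (incomplete format); outside Pre_
      | ch2 :: t2 =>
        if ch2 = '%' then
          let r := fmtA t2 d cnt
          ('%' :: r.1, r.2)
        else if ch2 = '(' then
          let nm := String.ofList (t2.takeWhile (fun c => c ≠ ')'))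
          match h : t2.dropWhile (fun c => c ≠ ')') with
          | _ :: c2 :: rest =>
            if c2 = 's' then
              match d.get? nm with
              | some v =>                       -- name already mapped: reuse its '$n'
                let r := fmtA rest d cnt
                (v.toList ++ r.1, r.2)
              | none =>                         -- defaultdict miss: '${}'.format(next(gen))
                let v := "$" ++ PySem.Int.toStr cnt
                let r := fmtA rest (d.insert nm v) (cnt + 1)
                (v.toList ++ r.1, r.2)
            else ([], d, cnt)                   -- conversion other than 's'; outside Pre_
          | _ => ([], d, cnt)                   -- unclosed '%(…'; CPython raises; outside Pre_
        else ([], d, cnt)                       -- '%<flag/width/…>'; outside Pre_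
    else
      let r := fmtA t d cnt
      (ch :: r.1, r.2)
  termination_by cs _ _ => cs.length
  decreasing_by
    all_goals simp_wf
    all_goals first
      | omega
      | (have hle := List.length_dropWhile_le (fun c => decide (c ≠ ')')) t2;
         rw [h] at hle; simp at hle; omega)

def pyformat2psql_py (query : String) (named_args : List (String × String)) : String × List String :=
  let r := fmtA query.toList PySem.Dict.empty 1
  let positional_items := PySem.List.sorted r.2.1.items (fun item => keyA item.2) false
  -- named_args[named_arg]: assoc-list first-match lookup (type convention); a miss is a KeyError,
  -- excluded by Pre_, so the default "" is unreachable there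
  (String.ofList r.1, positional_items.map (fun item => (List.lookup item.1 named_args).getD ""))

-- ===== PORT B =====
-- Source B's token type: ('lit', c) | ('name', nm)
inductive Tok
  | lit : Char → Tok
  | name : String → Tok
deriving DecidableEq, Repr

-- Source B's _tokenize: the elif chain over the cursor becomes the same chain over the list head;
-- where Source B raises ValueError (stray/unfinished '%' spec; outside Pre_) the port stops.
def tokenize : List Char → List Tok
  | [] => []
  | c :: t =>
    if c ≠ '%' then .lit c :: tokenize t
    else
      match t with
      | [] => []                        -- Source B: raise ValueError
      | c2 :: t2 =>
        if c2 = '%' then .lit '%' :: tokenize t2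
        else if c2 = '(' then
          -- query.find(')', i+2) then startswith(')s', j)
          match h : t2.dropWhile (fun c => c ≠ ')') with
          | _ :: c3 :: rest =>
            if c3 = 's' then
              .name (String.ofList (t2.takeWhile (fun c => c ≠ ')'))) :: tokenize rest
            else []                     -- Source B: raise ValueError
          | _ => []                     -- Source B: raise ValueError
        else []                         -- Source B: raise ValueError
  termination_by cs => cs.length
  decreasing_by
    all_goals simp_wf
    all_goals first
      | omega
      | (have hle := List.length_dropWhile_le (fun c => decide (c ≠ ')')) t2;
         rw [h] at hle; simp at hle; omega)

-- the generator 'name for kind, name in tokens if kind == name'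
def tokNames (ts : List Tok) : List String :=
  ts.filterMap fun t => match t with | .name nm => some nm | .lit _ => none

def pyformat2psql_py_alt (query : String) (named_args : List (String × String)) : String × List String :=
  let tokens := tokenize query.toList
  let order := PySem.List.dedup (tokNames tokens)                      -- list(dict.fromkeys(…))
  let index : List (String × Int) :=
    (PySem.List.enumerate order).map (fun p => (p.2, p.1 + 1))         -- {name: k+1 for k, name in enumerate(order)}
  let psql := tokens.flatMap fun t => match t with                     -- ''.join(…)
    | .lit c => [c]
    | .name nm => '$' :: (PySem.Int.toStr ((List.lookup nm index).getD 0)).toList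
  (String.ofList psql, order.map fun nm => (List.lookup nm named_args).getD "")

-- ===== PRECONDITION & SPEC =====
-- the placeholder grammar of the query: 'some names' iff every '%' starts '%%' or a
-- parenthesis-free '%(name)s' placeholder, collecting the names in order (a parse of the
-- format string only — no dict, no counter, no output is computed here)
def fmtNamesAux : List Char → Option (List Char) → Option (List String)
  | [], none => some []
  | [], some _ => none                    -- unclosed '%(…'
  | c :: t, some acc =>
    if c = ')' then
      match t with
      | 's' :: r => (fmtNamesAux r none).map (fun ns => String.ofList acc.reverse :: ns)
      | _ => none                         -- conversion other than plain 's'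
    else fmtNamesAux t (some (c :: acc))
  | c :: t, none =>
    if c = '%' then
      match t with
      | '%' :: t2 => fmtNamesAux t2 none
      | '(' :: t2 => fmtNamesAux t2 (some [])
      | _ => none                         -- stray '%' spec (flags/width/bare '%s'/trailing '%')
    else fmtNamesAux t none

def fmtNames (cs : List Char) : Option (List String) := fmtNamesAux cs none

-- Pre_ excludes (i) queries on which the '%' operator raises (stray/unfinished '%' specs,
-- names missing from named_args → KeyError) and (ii) queries A still formats but through
-- specs other than plain '%(name)s' (width/precision/flags or a conversion other than 's',
-- or a parenthesised name) — there A pads or reprs the '$n' placeholder / embeds the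
-- defaultdict repr, and B raises ValueError instead.
def Pre_pyformat2psql_py (query : String) (named_args : List (String × String)) : Prop :=
  (fmtNames query.toList).isSome = true ∧
    ∀ n ∈ (fmtNames query.toList).getD [], (List.lookup n named_args).isSome = true

instance (query : String) (named_args : List (String × String)) : Decidable (Pre_pyformat2psql_py query named_args) := by unfold Pre_pyformat2psql_py; infer_instance

def pvWitness_pyformat2psql_py : String × (List (String × String)) :=
  ("%(x)s", [("x", "1")])

def Spec_pyformat2psql_py (query : String) (named_args : List (String × String)) (out : String × List String) : Prop := out = pyformat2psql_py_alt query named_args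
instance (query : String) (named_args : List (String × String)) (out : String × List String) : Decidable (Spec_pyformat2psql_py query named_args out) := by unfold Spec_pyformat2psql_py; infer_instance

-- ===== CLAIM (what is proved, stated in full; the proofs are below) =====
def Claim_equal_pyformat2psql_py : Prop := ∀ (query : String) (named_args : List (String × String)), Dom_pyformat2psql_py query named_args → Pre_pyformat2psql_py query named_args → Spec_pyformat2psql_py query named_args (pyformat2psql_py query named_args)

-- ===== LEMMAS AND PROOFS =====

-- A one-pass scan (proof helper only): what A's defaultdict trick amounts to with the
-- positional numbers kept as ints and the args collected online; it is the bridge between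
-- A's fmtA (proved equal to it in fmt_rel) and B's staged passes (stage_rel).
def fmtB (named_args : List (String × String)) :
    List Char → PySem.Dict String Int → List String → (List Char × PySem.Dict String Int × List String)
  | [], seen, args => ([], seen, args)
  | ch :: t, seen, args =>
    if ch = '%' then
      match t with
      | [] => ([], seen, args)
      | ch2 :: t2 =>
        if ch2 = '%' then
          let r := fmtB named_args t2 seen args
          ('%' :: r.1, r.2)
        else if ch2 = '(' then
          let nm := String.ofList (t2.takeWhile (fun c => c ≠ ')'))
          match h : t2.dropWhile (fun c => c ≠ ')') with
          | _ :: c2 :: rest =>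
            if c2 = 's' then
              match seen.get? nm with
              | some n =>
                let r := fmtB named_args rest seen args
                ('$' :: (PySem.Int.toStr n).toList ++ r.1, r.2)
              | none =>
                let n : Int := (args.length : Int) + 1
                let args' := args ++ [(List.lookup nm named_args).getD ""]
                let r := fmtB named_args rest (seen.insert nm n) args'
                ('$' :: (PySem.Int.toStr n).toList ++ r.1, r.2)
            else ([], seen, args)
          | _ => ([], seen, args)
        else ([], seen, args)
    else
      let r := fmtB named_args t seen args
      (ch :: r.1, r.2)
  termination_by cs _ _ => cs.length
  decreasing_by
    all_goals simp_wf
    all_goals first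
      | omega
      | (have hle := List.length_dropWhile_le (fun c => decide (c ≠ ')')) t2;
         rw [h] at hle; simp at hle; omega)

-- A's dict value for positional number n
def sVal (n : Int) : String := "$" ++ PySem.Int.toStr n

def pairVal (p : String × Int) : String × String := (p.1, sVal p.2)

-- the loop invariant tying fmtB's state to fmtA's
def InvAB (named_args : List (String × String)) (seen : PySem.Dict String Int) (args : List String) : Prop :=
  seen.items.map Prod.snd = List.map (fun i : Nat => (i : Int) + 1) (List.range args.length) ∧
  args = seen.items.map (fun p => (List.lookup p.1 named_args).getD "") ∧
  seen.keys.Nodup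

theorem decDigitsVal_aux (m : Nat) : ∀ a : Int,
    (Nat.toDigits 10 m).foldl (fun a c => a * 10 + ((c.toNat : Int) - 48)) a
      = a * 10 ^ (Nat.toDigits 10 m).length + m := by
  induction m using Nat.strong_induction_on with
  | _ m ih =>
    intro a
    by_cases hm : m < 10
    · rw [Nat.toDigits_of_lt_base hm]
      have : ((Nat.digitChar m).toNat : Int) = 48 + m := by interval_cases m <;> decide
      simp [this]
    · rw [Nat.toDigits_of_base_le (by norm_num) (by omega)]
      rw [List.foldl_append, List.length_append]
      rw [ih (m / 10) (by omega) a]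
      have h10 : m % 10 < 10 := Nat.mod_lt _ (by norm_num)
      have hdc : ((Nat.digitChar (m % 10)).toNat : Int) = 48 + (m % 10 : Nat) := by
        interval_cases h : (m % 10) <;> decide
      simp only [List.foldl, hdc, List.length_cons, List.length_nil, Nat.zero_add]
      rw [pow_succ, ← mul_assoc]
      generalize a * 10 ^ (Nat.toDigits 10 (m / 10)).length = B
      omega

theorem decDigitsVal_toDigits (m : Nat) : decDigitsVal (Nat.toDigits 10 m) = (m : Int) := by
  unfold decDigitsVal
  rw [decDigitsVal_aux m 0]; ring_nf

theorem no_dollar_toChars (n : Int) (h : 0 ≤ n) : '$' ∉ PySem.Int.toChars n := by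
  intro hmem
  unfold PySem.Int.toChars at hmem
  rw [if_neg (by omega)] at hmem
  have := Nat.isDigit_of_mem_toDigits (b := 10) (by norm_num) (le_refl 10) hmem
  simp [Char.isDigit] at this

theorem replace_go_no_dollar (fuel : Nat) : ∀ (l acc : List Char), '$' ∉ l →
    PySem.Chars.replace.go ['$'] [] fuel l acc = acc.reverse ++ l := by
  induction fuel with
  | zero => intro l acc h; simp [PySem.Chars.replace.go]
  | succ fuel ih =>
    intro l acc h
    cases l with
    | nil => simp [PySem.Chars.replace.go]
    | cons c t =>
      have hc : c ≠ '$' := by rintro rfl; exact h (List.mem_cons_self)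
      have hpre : List.isPrefixOf ['$'] (c :: t) = false := by
        simp [List.isPrefixOf]; exact fun hh => absurd hh.symm hc
      rw [PySem.Chars.replace.go.eq_def]
      simp only [hpre, Bool.false_eq_true, if_false]
      rw [ih t (c :: acc) (fun hm => h (List.mem_cons_of_mem _ hm))]
      simp

theorem keyA_sVal (n : Int) (h : 0 ≤ n) : keyA (sVal n) = n := by
  unfold keyA sVal
  rw [PySem.Str.toList_replace]
  have h1 : ("$" ++ PySem.Int.toStr n).toList = '$' :: PySem.Int.toChars n := by
    rw [String.toList_append, PySem.Int.toList_toStr]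
    rfl
  rw [h1]
  have h2 : PySem.Chars.replace ('$' :: PySem.Int.toChars n) "$".toList "".toList
      = PySem.Int.toChars n := by
    show PySem.Chars.replace _ ['$'] [] = _
    rw [PySem.Chars.replace]
    simp only [List.isEmpty_cons, Bool.false_eq_true, if_false, List.length_cons]
    rw [PySem.Chars.replace.go.eq_def]
    simp only [List.isPrefixOf, beq_self_eq_true, Bool.and_true, if_true,
      List.reverse_nil, List.nil_append]
    simp only [List.length_singleton, List.drop_succ_cons, List.drop_zero]
    rw [replace_go_no_dollar _ _ _ (no_dollar_toChars n h)]
    simp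
  rw [h2]
  unfold PySem.Int.toChars
  rw [if_neg (by omega)]
  rw [decDigitsVal_toDigits]
  omega

theorem get?_mk_map (l : List (String × Int)) (nm : String) :
    (PySem.Dict.mk (l.map pairVal)).get? nm
      = ((PySem.Dict.mk l).get? nm).map sVal := by
  induction l with
  | nil => rfl
  | cons p t ih =>
    obtain ⟨k, n⟩ := p
    simp only [List.map_cons, pairVal, PySem.Dict.get?_mk_cons]
    split <;> simp [ih]

theorem contains_mk_map (l : List (String × Int)) (nm : String) :
    (PySem.Dict.mk (l.map pairVal)).contains nm = (PySem.Dict.mk l).contains nm := by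
  rw [PySem.Dict.contains_eq_isSome_get?, PySem.Dict.contains_eq_isSome_get?, get?_mk_map]
  simp

theorem insert_mk_map (seen : PySem.Dict String Int) (nm : String) (n : Int)
    (hnc : seen.contains nm = false) :
    (PySem.Dict.mk (seen.items.map pairVal)).insert nm (sVal n)
      = PySem.Dict.mk ((seen.insert nm n).items.map pairVal) := by
  apply PySem.Dict.ext
  have h1 : (PySem.Dict.mk (seen.items.map pairVal)).contains nm = false := by
    rw [contains_mk_map]; exact hnc
  rw [PySem.Dict.items_insert_of_not_contains _ _ h1]
  rw [PySem.Dict.items_insert_of_not_contains _ _ hnc]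
  simp [pairVal]

theorem dict_eta {ν : Type} (d : PySem.Dict String ν) : PySem.Dict.mk d.items = d := rfl

theorem sVal_toList (n : Int) : (sVal n).toList = '$' :: (PySem.Int.toStr n).toList := by
  unfold sVal
  rw [String.toList_append]
  rfl

theorem fmt_rel (named_args : List (String × String)) (cs : List Char)
    (seen : PySem.Dict String Int) (args : List String) :
    InvAB named_args seen args →
      fmtA cs (PySem.Dict.mk (seen.items.map pairVal)) ((args.length : Int) + 1)
        = ((fmtB named_args cs seen args).1,
           PySem.Dict.mk ((fmtB named_args cs seen args).2.1.items.map pairVal),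
           (((fmtB named_args cs seen args).2.2.length : Int) + 1))
      ∧ InvAB named_args (fmtB named_args cs seen args).2.1 (fmtB named_args cs seen args).2.2 := by
  fun_induction fmtB named_args cs seen args
  all_goals intro hinv
  case case4 =>
    rename_i seen args t2 nm head rest n hget r hne hdrop ih
    obtain ⟨hA, hI⟩ := ih hinv
    refine ⟨?_, hI⟩
    simp only [fmtA, Char.reduceEq, reduceIte, get?_mk_map, dict_eta]
    split
    next heq =>
      rw [hdrop] at heq
      injection heq with h1 h2; injection h2 with h2 h3
      subst h3
      rw [← h2]
      simp only [Char.reduceEq, reduceIte]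
      have hget' : seen.get? (String.ofList (List.takeWhile (fun c => decide (c ≠ ')')) t2)) = some n := hget
      simp only [hget', Option.map_some, hA, sVal_toList]
      rfl
    next hno =>
      exact absurd hdrop (hno _ _ _)
  case case5 =>
    rename_i seen args t2 nm head rest hget n args' r hne hdrop ih
    have hget' : seen.get? (String.ofList (List.takeWhile (fun c => decide (c ≠ ')')) t2)) = none := hget
    have hnc : seen.contains (String.ofList (List.takeWhile (fun c => decide (c ≠ ')')) t2)) = false :=
      (PySem.Dict.get?_eq_none_iff_contains _ _).mp hget'
    have hitems : (seen.insert nm n).items = seen.items ++ [(nm, n)] :=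
      PySem.Dict.items_insert_of_not_contains _ _ hnc
    obtain ⟨hsnd, hargs, hnd⟩ := hinv
    have hinv' : InvAB named_args (seen.insert nm n) args' := by
      refine ⟨?_, ?_, PySem.Dict.nodup_keys_insert _ _ _ hnd⟩
      · simp only [hitems, List.map_append, hsnd, args', List.length_append,
          List.length_cons, List.length_nil, List.map_cons, List.map_nil]
        rw [List.range_succ]
        simp [n]
      · simp only [hitems, List.map_append, List.map_cons, List.map_nil, args']
        rw [← hargs]
    obtain ⟨hA, hI⟩ := ih hinv'
    have hlen : ((args'.length : Int) + 1) = ((args.length : Int) + 1 + 1) := by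
      simp [args']
    rw [hlen] at hA
    refine ⟨?_, hI⟩
    simp only [fmtA, Char.reduceEq, reduceIte, get?_mk_map, dict_eta]
    split
    next heq =>
      rw [hdrop] at heq
      injection heq with h1 h2; injection h2 with h2 h3
      subst h3
      rw [← h2]
      simp only [Char.reduceEq, reduceIte, hget', Option.map_none]
      have hins : ({ items := List.map pairVal seen.items } : PySem.Dict String String).insert
            (String.ofList (List.takeWhile (fun c => decide (c ≠ ')')) t2))
            ("$" ++ PySem.Int.toStr ((args.length : Int) + 1))
          = PySem.Dict.mk ((seen.insert (String.ofList (List.takeWhile (fun c => decide (c ≠ ')')) t2)) ((args.length : Int) + 1)).items.map pairVal) :=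
        insert_mk_map seen _ _ hnc
      rw [hins, hA]
      rw [show ("$" ++ PySem.Int.toStr ((args.length : Int) + 1)).toList
            = '$' :: (PySem.Int.toStr ((args.length : Int) + 1)).toList from sVal_toList _]
    next hno =>
      exact absurd hdrop (hno _ _ _)
  case case1 => exact ⟨by simp [fmtA], hinv⟩
  case case2 => exact ⟨by simp [fmtA], hinv⟩
  case case3 =>
    rename_i seen args t2 r ih
    obtain ⟨hA, hI⟩ := ih hinv
    refine ⟨?_, hI⟩
    simp only [fmtA, Char.reduceEq, reduceIte, hA]
    rfl
  case case6 =>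
    rename_i seen args t2 head c2 rest hdrop hs hne
    refine ⟨?_, hinv⟩
    simp only [fmtA, Char.reduceEq, reduceIte]
    split
    next heq =>
      rw [hdrop] at heq
      injection heq with h1 h2; injection h2 with h2 h3
      rw [← h2]
      rw [if_neg hs]
    next hno =>
      exact absurd hdrop (hno _ _ _)
  case case7 =>
    rename_i seen args t2 hnone hne
    refine ⟨?_, hinv⟩
    simp only [fmtA, Char.reduceEq, reduceIte]
  case case8 =>
    rename_i seen args ch2 t2 hne1 hne2
    refine ⟨?_, hinv⟩
    simp only [fmtA, Char.reduceEq, reduceIte, hne1, hne2, if_false]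
  case case9 =>
    rename_i ch t seen args hch r ih
    obtain ⟨hA, hI⟩ := ih hinv
    refine ⟨?_, hI⟩
    rw [fmtA.eq_def]
    simp only [hch, if_false, hA]
    rfl

-- ===== relating fmtB to B's staged passes =====

-- the index table built from an order prefix starting at position k
def mkIdxK (k : Int) (P : List String) : List (String × Int) :=
  (PySem.List.enumerate P k).map (fun p => (p.2, p.1 + 1))

theorem mkIdxK_nil (k : Int) : mkIdxK k [] = [] := rfl

theorem mkIdxK_cons (k : Int) (x : String) (P : List String) :
    mkIdxK k (x :: P) = (x, k + 1) :: mkIdxK (k + 1) P := by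
  simp [mkIdxK, PySem.List.enumerate_cons]

theorem mkIdxK_append (k : Int) (P Q : List String) :
    mkIdxK k (P ++ Q) = mkIdxK k P ++ mkIdxK (k + P.length) Q := by
  simp [mkIdxK, PySem.List.enumerate_append]

theorem lookup_mkIdxK_eq_none_iff (k : Int) (P : List String) (n : String) :
    List.lookup n (mkIdxK k P) = none ↔ n ∉ P := by
  induction P generalizing k with
  | nil => simp [mkIdxK_nil]
  | cons x t ih =>
    rw [mkIdxK_cons]
    by_cases hx : n = x
    · subst hx; simp [List.lookup]
    · simp [List.lookup, beq_false_of_ne hx, ih, hx]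

theorem lookup_append_left {α : Type} {β : Type} [BEq α] (n : α) (l₁ l₂ : List (α × β)) (v : β)
    (h : List.lookup n l₁ = some v) : List.lookup n (l₁ ++ l₂) = some v := by
  induction l₁ with
  | nil => simp [List.lookup] at h
  | cons p t ih =>
    rw [List.cons_append, List.lookup]
    rw [List.lookup] at h
    cases hb : (n == p.1) with
    | true => simpa [hb] using h
    | false => rw [hb] at h; exact ih h

theorem get?_eq_lookup (l : List (String × Int)) (n : String) :
    (PySem.Dict.mk l).get? n = List.lookup n l := by
  induction l with
  | nil => rfl
  | cons p t ih =>
    obtain ⟨k, v⟩ := p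
    rw [PySem.Dict.get?_mk_cons, List.lookup]
    have : (k == n) = (n == k) := by
      cases hb : (k == n) with
      | true => exact (beq_iff_eq.mpr (beq_iff_eq.mp hb).symm).symm
      | false =>
        cases hb2 : (n == k) with
        | true => rw [beq_iff_eq.mpr (beq_iff_eq.mp hb2).symm] at hb; exact hb.symm ▸ rfl
        | false => rfl
    rw [this]
    cases (n == k) <;> simp [ih]

-- the invariant tying fmtB's state to the order prefix P
def InvStage (named_args : List (String × String)) (P : List String)
    (seen : PySem.Dict String Int) (args : List String) : Prop :=
  seen.items = mkIdxK 0 P ∧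
  args = P.map (fun nm => (List.lookup nm named_args).getD "") ∧
  P.Nodup

theorem lookup_append_none {α : Type} {β : Type} [BEq α] (n : α) (l₁ l₂ : List (α × β))
    (h : List.lookup n l₁ = none) : List.lookup n (l₁ ++ l₂) = List.lookup n l₂ := by
  induction l₁ with
  | nil => rfl
  | cons p t ih =>
    rw [List.cons_append, List.lookup]
    rw [List.lookup] at h
    cases hb : (n == p.1) with
    | true => rw [hb] at h; exact absurd h (by simp)
    | false => rw [hb] at h; exact ih h

theorem foldl_add_prefix (l : List String) : ∀ P : List String,
    ∃ Q, l.foldl PySem.Set.add P = P ++ Q := by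
  induction l with
  | nil => exact fun P => ⟨[], by simp⟩
  | cons x t ih =>
    intro P
    by_cases hx : x ∈ P
    · obtain ⟨Q, hQ⟩ := ih P
      exact ⟨Q, by simp [List.foldl_cons, PySem.Set.add_of_mem hx, hQ]⟩
    · obtain ⟨Q, hQ⟩ := ih (P ++ [x])
      exact ⟨[x] ++ Q, by simp [List.foldl_cons, PySem.Set.add_of_not_mem hx, hQ]⟩

-- tokenize one-step equations
theorem tok_other (c : Char) (t : List Char) (h : ¬ c = '%') :
    tokenize (c :: t) = .lit c :: tokenize t := by
  rw [tokenize.eq_def]; simp [h]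

theorem tok_pct_nil : tokenize ['%'] = [] := by
  rw [tokenize.eq_def]; simp

theorem tok_pctpct (t2 : List Char) : tokenize ('%' :: '%' :: t2) = .lit '%' :: tokenize t2 := by
  rw [tokenize.eq_def]; simp

theorem tok_pct_other (c2 : Char) (t2 : List Char) (h1 : ¬ c2 = '%') (h2 : ¬ c2 = '(') :
    tokenize ('%' :: c2 :: t2) = [] := by
  rw [tokenize.eq_def]; simp [h1, h2]

theorem tok_paren (t2 : List Char) : tokenize ('%' :: '(' :: t2)
    = (match t2.dropWhile (fun c => c ≠ ')') with
      | _ :: c3 :: rest =>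
        if c3 = 's' then
          Tok.name (String.ofList (t2.takeWhile (fun c => c ≠ ')'))) :: tokenize rest
        else []
      | _ => []) := by
  rw [tokenize.eq_def]
  simp only [ne_eq, Char.reduceEq, not_true_eq_false, if_false, if_true]
  split
  next hd c3 rest heq => rw [heq]
  next hno =>
    rcases hdw : t2.dropWhile (fun c => c ≠ ')') with _ | ⟨hd, _ | ⟨c3, rest⟩⟩
    · rfl
    · rfl
    · exact (hno hd c3 rest hdw).elim

theorem stage_rel (named_args : List (String × String)) (cs : List Char)
    (seen : PySem.Dict String Int) (args : List String) :
    ∀ P : List String, InvStage named_args P seen args →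
      (fmtB named_args cs seen args).1
          = (tokenize cs).flatMap (fun t => match t with
              | .lit c => [c]
              | .name nm => '$' :: (PySem.Int.toStr
                  ((List.lookup nm (mkIdxK 0 ((tokNames (tokenize cs)).foldl PySem.Set.add P))).getD 0)).toList)
      ∧ InvStage named_args ((tokNames (tokenize cs)).foldl PySem.Set.add P)
          (fmtB named_args cs seen args).2.1 (fmtB named_args cs seen args).2.2 := by
  fun_induction fmtB named_args cs seen args
  all_goals intro P hinv
  case case1 => exact ⟨by simp [tokenize, tokNames], by simpa [tokenize, tokNames] using hinv⟩
  case case2 => exact ⟨by simp [tok_pct_nil, tokNames], by simpa [tok_pct_nil, tokNames] using hinv⟩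
  case case3 =>
    rename_i seen args t2 r ih
    obtain ⟨h1, h2⟩ := ih P hinv
    rw [tok_pctpct]
    refine ⟨?_, by simpa [tokNames] using h2⟩
    simp only [List.flatMap_cons, tokNames, List.filterMap_cons]
    exact congrArg _ h1
  case case4 =>
    rename_i seen args t2 nm hd rest n hget r hne hdrop ih
    obtain ⟨hitems, hargs, hnd⟩ := hinv
    have hlk : List.lookup nm (mkIdxK 0 P) = some n := by
      rw [← hitems, ← get?_eq_lookup, dict_eta]; exact hget
    have hmem : nm ∈ P := by
      by_contra hmem
      rw [(lookup_mkIdxK_eq_none_iff 0 P nm).mpr hmem] at hlk; exact absurd hlk (by simp)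
    have htok : tokenize ('%' :: '(' :: t2) = Tok.name nm :: tokenize rest := by
      rw [tok_paren, hdrop]; rfl
    rw [htok]
    have hfold : (tokNames (Tok.name nm :: tokenize rest)).foldl PySem.Set.add P
        = (tokNames (tokenize rest)).foldl PySem.Set.add P := by
      simp [tokNames, List.filterMap_cons, PySem.Set.add_of_mem hmem]
    obtain ⟨h1, h2⟩ := ih P ⟨hitems, hargs, hnd⟩
    rw [hfold]
    refine ⟨?_, h2⟩
    simp only [List.flatMap_cons]
    obtain ⟨Q, hQ⟩ := foldl_add_prefix (tokNames (tokenize rest)) P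
    have hlkF : List.lookup nm (mkIdxK 0 ((tokNames (tokenize rest)).foldl PySem.Set.add P))
        = some n := by
      rw [hQ, mkIdxK_append]
      exact lookup_append_left _ _ _ _ hlk
    rw [hlkF]
    simpa using congrArg (fun l => '$' :: (PySem.Int.toStr n).toList ++ l) h1
  case case5 =>
    rename_i seen args t2 nm hd rest hget n args' r hne hdrop ih
    obtain ⟨hitems, hargs, hnd⟩ := hinv
    have hlk : List.lookup nm (mkIdxK 0 P) = none := by
      rw [← hitems, ← get?_eq_lookup, dict_eta]; exact hget
    have hmem : nm ∉ P := (lookup_mkIdxK_eq_none_iff 0 P nm).mp hlk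
    have hnc : seen.contains nm = false := by
      rw [PySem.Dict.contains_eq_isSome_get?, hget]; rfl
    have hlenP : args.length = P.length := by rw [hargs, List.length_map]
    have hn : n = (P.length : Int) + 1 := by simp [n, hlenP]
    have hitems' : (seen.insert nm n).items = mkIdxK 0 (P ++ [nm]) := by
      rw [PySem.Dict.items_insert_of_not_contains _ _ hnc, hitems, mkIdxK_append]
      simp [mkIdxK_cons, mkIdxK_nil, hn]
    have hinv' : InvStage named_args (P ++ [nm]) (seen.insert nm n) args' := by
      refine ⟨hitems', ?_, ?_⟩
      · simp [args', hargs]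
      · simp only [List.nodup_append, List.nodup_singleton, true_and]
        refine ⟨hnd, ?_⟩
        intro a ha b hb h
        simp only [List.mem_singleton] at hb
        exact hmem (hb ▸ h ▸ ha)
    have htok : tokenize ('%' :: '(' :: t2) = Tok.name nm :: tokenize rest := by
      rw [tok_paren, hdrop]; rfl
    rw [htok]
    have hfold : (tokNames (Tok.name nm :: tokenize rest)).foldl PySem.Set.add P
        = (tokNames (tokenize rest)).foldl PySem.Set.add (P ++ [nm]) := by
      simp [tokNames, List.filterMap_cons, PySem.Set.add_of_not_mem hmem]
    obtain ⟨h1, h2⟩ := ih (P ++ [nm]) hinv'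
    rw [hfold]
    refine ⟨?_, h2⟩
    simp only [List.flatMap_cons]
    obtain ⟨Q, hQ⟩ := foldl_add_prefix (tokNames (tokenize rest)) (P ++ [nm])
    have hlk1 : List.lookup nm (mkIdxK 0 (P ++ [nm])) = some n := by
      rw [mkIdxK_append, lookup_append_none _ _ _ hlk]
      simp [mkIdxK_cons, hn]
    have hlkF : List.lookup nm (mkIdxK 0 ((tokNames (tokenize rest)).foldl PySem.Set.add (P ++ [nm])))
        = some n := by
      rw [hQ, mkIdxK_append]
      exact lookup_append_left _ _ _ _ hlk1
    rw [hlkF]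
    simpa using congrArg (fun l => '$' :: (PySem.Int.toStr n).toList ++ l) h1
  case case6 =>
    rename_i seen args t2 hd c3 rest hdrop hs hne
    have htok : tokenize ('%' :: '(' :: t2) = [] := by
      rw [tok_paren, hdrop]; exact if_neg hs
    rw [htok]
    exact ⟨rfl, by simpa [tokNames] using hinv⟩
  case case7 =>
    rename_i seen args t2 hno hne
    have htok : tokenize ('%' :: '(' :: t2) = [] := by
      rw [tok_paren]
      rcases hdw : t2.dropWhile (fun c => c ≠ ')') with _ | ⟨hd, _ | ⟨c3, rest⟩⟩
      · rfl
      · rfl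
      · exact (hno hd c3 rest hdw).elim
    rw [htok]
    exact ⟨rfl, by simpa [tokNames] using hinv⟩
  case case8 =>
    rename_i seen args c2 t2 hne1 hne2
    rw [tok_pct_other c2 t2 hne1 hne2]
    exact ⟨rfl, by simpa [tokNames] using hinv⟩
  case case9 =>
    rename_i ch t seen args hch r ih
    obtain ⟨h1, h2⟩ := ih P hinv
    rw [tok_other ch t hch]
    refine ⟨?_, by simpa [tokNames] using h2⟩
    simp only [List.flatMap_cons, tokNames, List.filterMap_cons]
    exact congrArg _ h1

-- B's staged result equals the one-pass fmtB result
theorem alt_eq_fmtB (query : String) (named_args : List (String × String)) :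
    pyformat2psql_py_alt query named_args
      = (String.ofList (fmtB named_args query.toList PySem.Dict.empty []).1,
         (fmtB named_args query.toList PySem.Dict.empty []).2.2) := by
  have h0 : InvStage named_args [] PySem.Dict.empty [] := ⟨rfl, rfl, List.nodup_nil⟩
  obtain ⟨h1, hitems, hargs, hnd⟩ :=
    And.intro (stage_rel named_args query.toList PySem.Dict.empty [] [] h0).1
      (stage_rel named_args query.toList PySem.Dict.empty [] [] h0).2
  have hded : PySem.List.dedup (tokNames (tokenize query.toList))
      = (tokNames (tokenize query.toList)).foldl PySem.Set.add [] := rfl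
  unfold pyformat2psql_py_alt
  refine Prod.ext ?_ ?_
  · show String.ofList _ = String.ofList _
    rw [h1, hded]
    rfl
  · show (PySem.List.dedup (tokNames (tokenize query.toList))).map _ = _
    rw [hded, hargs]

-- ===== VERDICT (by name: the statement is the Claim_ definition above) =====
theorem pyformat2psql_py_spec : Claim_equal_pyformat2psql_py := by
  unfold Claim_equal_pyformat2psql_py
  intro query named_args _hdom _hpre
  unfold Spec_pyformat2psql_py pyformat2psql_py
  rw [alt_eq_fmtB]
  have h0 : InvAB named_args PySem.Dict.empty [] := ⟨rfl, rfl, List.nodup_nil⟩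
  have hrel := fmt_rel named_args query.toList PySem.Dict.empty [] h0
  obtain ⟨hA, hsnd, hargs, hnd⟩ := And.intro hrel.1 hrel.2
  have hA' : fmtA query.toList PySem.Dict.empty 1
      = ((fmtB named_args query.toList PySem.Dict.empty []).1,
         PySem.Dict.mk ((fmtB named_args query.toList PySem.Dict.empty []).2.1.items.map pairVal),
         ((fmtB named_args query.toList PySem.Dict.empty []).2.2.length : Int) + 1) := hA
  have hnn : ∀ p ∈ (fmtB named_args query.toList PySem.Dict.empty []).2.1.items, (0:Int) ≤ p.2 := by
    intro p hp
    have hm : p.2 ∈ (fmtB named_args query.toList PySem.Dict.empty []).2.1.items.map Prod.snd :=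
      List.mem_map_of_mem hp
    rw [hsnd] at hm
    simp at hm
    obtain ⟨i, _, hi⟩ := hm
    omega
  have hpl : (fmtB named_args query.toList PySem.Dict.empty []).2.1.items.Pairwise (fun p q => p.2 < q.2) := by
    have h1 : ((fmtB named_args query.toList PySem.Dict.empty []).2.1.items.map Prod.snd).Pairwise (· < ·) := by
      rw [hsnd]
      refine List.Pairwise.map _ ?_ List.pairwise_lt_range
      intro a b hab
      simpa using hab
    exact List.pairwise_map.mp h1
  have hpw : ((fmtB named_args query.toList PySem.Dict.empty []).2.1.items.map pairVal).Pairwise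
      (fun a b => keyA a.2 < keyA b.2) := by
    rw [List.pairwise_map]
    exact List.Pairwise.imp_of_mem (fun {p q} hp hq h => by
      show keyA (pairVal p).2 < keyA (pairVal q).2
      simp only [pairVal]
      rw [keyA_sVal _ (hnn _ hp), keyA_sVal _ (hnn _ hq)]
      exact h) hpl
  have hsort := PySem.List.sorted_eq_of_perm_of_pairwise_lt
      ((fmtB named_args query.toList PySem.Dict.empty []).2.1.items.map pairVal)
      ((fmtB named_args query.toList PySem.Dict.empty []).2.1.items.map pairVal)
      (fun item => keyA item.2) (List.Perm.refl _) hpw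
  show (String.ofList (fmtA query.toList PySem.Dict.empty 1).1,
        ((PySem.List.sorted (fmtA query.toList PySem.Dict.empty 1).2.1.items (fun item => keyA item.2) false).map
          (fun item => (List.lookup item.1 named_args).getD "")))
      = (String.ofList (fmtB named_args query.toList PySem.Dict.empty []).1,
         (fmtB named_args query.toList PySem.Dict.empty []).2.2)
  rw [hA']
  show (String.ofList (fmtB named_args query.toList PySem.Dict.empty []).1,
        ((PySem.List.sorted
            ((fmtB named_args query.toList PySem.Dict.empty []).2.1.items.map pairVal)
            (fun item => keyA item.2) false).map
          (fun item => (List.lookup item.1 named_args).getD "")))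
      = (String.ofList (fmtB named_args query.toList PySem.Dict.empty []).1,
         (fmtB named_args query.toList PySem.Dict.empty []).2.2)
  rw [hsort]
  refine Prod.ext rfl ?_
  show ((fmtB named_args query.toList PySem.Dict.empty []).2.1.items.map pairVal).map
        (fun item => (List.lookup item.1 named_args).getD "")
      = (fmtB named_args query.toList PySem.Dict.empty []).2.2
  rw [List.map_map, hargs]
  rfl
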